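-- pv_equiv track=rewrite | github.com/leodotnet/addr | util.py | action2chunk
-- ===== SOURCE A (Python) =====
-- def action2chunk(actions:[]):
--     chunks = []
--     chunk = list()
--     start_pos = 0
--     pos = 0
--     for action_tok in actions:
--
--         if action_tok.startswith('APPEND'):
--             pos += 1
--         else: #LABEL(..)
--             label_str = action_tok[6:-1]
--             chunk = (label_str, start_pos, pos)
--             chunks.append(chunk)
--             start_pos = pos
--     return chunks
-- ===== SOURCE B (Python) =====
-- def action2chunk(actions):
--     # Two-phase: first split the action stream into segments, each segment
--     # being (its APPEND tokens, its terminating label token); trailing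
--     # APPENDs with no label are discarded. Then assign positions by a
--     # running end over the segments.
--     segments = []
--     cur = []
--     for tok in actions:
--         if tok.startswith('APPEND'):
--             cur.append(tok)
--         else:
--             segments.append((cur, tok))
--             cur = []
--     chunks = []
--     end = 0
--     for appends, label_tok in segments:
--         width = len(appends)
--         start = end
--         end = start + width
--         chunks.append((label_tok[6:-1], start, end))
--     return chunks
-- ===== Notes on version B (the rewrite author's own statement) =====
-- stated objective: alternative
-- what changed: Replaced the inline position/state machine by a two-phase pipeline: first group tokens into (APPENDs, label) segments, then a second pass assigns start/end positions from a running end over the segments.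
import Mathlib
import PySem

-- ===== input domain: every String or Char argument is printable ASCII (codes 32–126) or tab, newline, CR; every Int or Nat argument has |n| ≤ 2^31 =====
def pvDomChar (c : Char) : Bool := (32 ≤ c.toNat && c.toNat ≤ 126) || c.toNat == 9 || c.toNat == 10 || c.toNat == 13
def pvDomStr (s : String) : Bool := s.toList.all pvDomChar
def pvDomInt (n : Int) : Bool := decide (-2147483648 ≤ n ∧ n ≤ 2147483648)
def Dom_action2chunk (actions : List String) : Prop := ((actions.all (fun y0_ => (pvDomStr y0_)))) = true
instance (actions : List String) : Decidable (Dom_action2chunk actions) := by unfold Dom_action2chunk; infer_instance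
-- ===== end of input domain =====

-- B restructures A's inline state machine as a two-phase pipeline (segment, then position); same values, no speed claim.

-- ===== PORT A =====
-- A's for-loop over (chunks, start_pos, pos), transcribed as structural recursion on the token list.
def aLoop : List String → List (String × Int × Int) → Int → Int → List (String × Int × Int)
  | [], chunks, _, _ => chunks
  | tok :: rest, chunks, start_pos, pos =>
    if PySem.Str.startswith tok "APPEND" then
      aLoop rest chunks start_pos (pos + 1)
    else
      aLoop rest (chunks ++ [(PySem.Str.slice tok (some 6) (some (-1)), start_pos, pos)]) pos pos

def action2chunk (actions : List String) : List (String × Int × Int) :=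
  aLoop actions [] 0 0

-- ===== PORT B =====
-- phase 1 of Source B: split into segments (APPEND tokens of the segment, its label token); trailing APPENDs dropped.
def segLoop : List String → List String → List (List String × String)
  | [], _cur => []
  | tok :: rest, cur =>
    if PySem.Str.startswith tok "APPEND" then segLoop rest (cur ++ [tok])
    else (cur, tok) :: segLoop rest []

-- phase 2 of Source B: assign start/end positions from a running end.
def emitLoop : List (List String × String) → Int → List (String × Int × Int)
  | [], _end_ => []
  | (appends, label_tok) :: rest, end_ =>
    (PySem.Str.slice label_tok (some 6) (some (-1)), end_, end_ + (appends.length : Int))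
      :: emitLoop rest (end_ + (appends.length : Int))

def action2chunk_alt (actions : List String) : List (String × Int × Int) :=
  emitLoop (segLoop actions []) 0

-- ===== PRECONDITION & SPEC =====
def Spec_action2chunk (actions : List String) (out : List (String × Int × Int)) : Prop := out = action2chunk_alt actions
instance (actions : List String) (out : List (String × Int × Int)) : Decidable (Spec_action2chunk actions out) := by unfold Spec_action2chunk; infer_instance

-- ===== CLAIM (what is proved, stated in full; the proofs are below) =====
def Claim_equal_action2chunk : Prop := ∀ (actions : List String), Dom_action2chunk actions → Spec_action2chunk actions (action2chunk actions)

-- ===== LEMMAS AND PROOFS =====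
-- Invariant: A's (chunks, start_pos, pos) state corresponds to B's pending segment cur with
-- pos = start_pos + cur.length; emitLoop only looks at segment lengths.
theorem aLoop_eq_emit (actions : List String) :
    ∀ (cur : List String) (chunks : List (String × Int × Int)) (start_pos pos : Int),
      pos = start_pos + (cur.length : Int) →
      aLoop actions chunks start_pos pos = chunks ++ emitLoop (segLoop actions cur) start_pos := by
  induction actions with
  | nil => intro cur chunks sp pos h; simp [aLoop, segLoop, emitLoop]
  | cons tok rest ih =>
    intro cur chunks sp pos h
    by_cases hA : PySem.Str.startswith tok "APPEND"
    · simp only [aLoop, segLoop, hA, if_true]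
      rw [ih (cur ++ [tok]) chunks sp (pos + 1) (by simp [h]; ring)]
    · simp only [aLoop, segLoop, hA]
      rw [ih [] (chunks ++ [(PySem.Str.slice tok (some 6) (some (-1)), sp, pos)]) pos pos (by simp)]
      simp [h, emitLoop]

-- ===== VERDICT (by name: the statement is the Claim_ definition above) =====
theorem action2chunk_spec : Claim_equal_action2chunk := by
  intro actions _
  unfold Spec_action2chunk action2chunk action2chunk_alt
  rw [aLoop_eq_emit actions [] [] 0 0 (by simp)]
  simp
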